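-- pv_equiv track=rewrite | github.com/pilyeooong/algorithm | baekjoon/1316.py | solution
-- ===== SOURCE A (Python) =====
-- def solution(words):
--     def is_group_word(word):
--         checker = []
--         for i in range(len(word)):
--             if word[i] in checker:
--                 if i - 1 >= 0 and word[i - 1] != word[i]:
--                     return False
--             else:
--                 checker.append(word[i])
--
--         return True
--
--     answer = 0
--     for word in words:
--         if is_group_word(word) == True:
--             answer += 1
--
--     return answer
-- ===== SOURCE B (Python) =====
-- def solution(words):
--     def is_group_word(word):
--         collapsed = []
--         for ch in word:
--             if not collapsed or collapsed[-1] != ch: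
--                 collapsed.append(ch)
--         return len(collapsed) == len(set(collapsed))
--
--     return sum(is_group_word(word) for word in words)
-- ===== Notes on version B (the rewrite author's own statement) =====
-- stated objective: idiomatic
-- what changed: B first collapses each word's consecutive equal characters into a run sequence and then checks that sequence for duplicates via len==len(set), instead of A's index loop maintaining a seen-list with membership tests and an early return; counting is a generator sum instead of an accumulator loop.
import Mathlib
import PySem

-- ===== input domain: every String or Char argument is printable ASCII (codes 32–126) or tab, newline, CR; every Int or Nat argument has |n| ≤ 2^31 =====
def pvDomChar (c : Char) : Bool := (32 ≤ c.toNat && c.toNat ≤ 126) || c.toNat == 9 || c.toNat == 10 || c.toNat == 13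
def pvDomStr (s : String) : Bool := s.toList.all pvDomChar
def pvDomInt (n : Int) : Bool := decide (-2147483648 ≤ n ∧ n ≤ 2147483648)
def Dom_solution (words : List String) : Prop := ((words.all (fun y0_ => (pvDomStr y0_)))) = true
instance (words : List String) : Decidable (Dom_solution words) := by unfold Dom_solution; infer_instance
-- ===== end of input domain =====

-- B collapses each word's consecutive equal characters first and then checks the collapsed
-- sequence for duplicates (len == len(set)), instead of A's index loop over a seen-list; same cost, more idiomatic.


-- ===== PORT A =====
-- is_group_word: loop over indices with a 'checker' seen-list; prev models word[i-1] (none at i = 0).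
-- 'i - 1 >= 0 and word[i-1] != word[i]' — false at the first index
def prevNe (prev : Option Char) (c : Char) : Bool :=
  match prev with | some p => p != c | none => false

def isGroupA : Option Char → List Char → List Char → Bool
  | _, _, [] => true
  | prev, checker, c :: rest =>
    if checker.contains c then
      if prevNe prev c then false
      else isGroupA (some c) checker rest
    else isGroupA (some c) (checker ++ [c]) rest

def solution (words : List String) : Int :=
  words.foldl (fun answer word =>
    if isGroupA none [] word.toList = true then answer + 1 else answer) 0

-- ===== PORT B =====
-- collapse consecutive equal characters into the run sequence
def collapseB (acc : List Char) : List Char → List Char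
  | [] => acc
  | c :: rest =>
    if acc = [] ∨ acc.getLast? ≠ some c then collapseB (acc ++ [c]) rest
    else collapseB acc rest

def isGroupB (word : String) : Bool :=
  let collapsed := collapseB [] word.toList
  collapsed.length == (PySem.Set.ofList collapsed).length

def solution_alt (words : List String) : Int :=
  words.foldl (fun acc word => acc + (if isGroupB word then 1 else 0)) 0

-- ===== PRECONDITION & SPEC =====
def Spec_solution (words : List String) (out : Int) : Prop := out = solution_alt words
instance (words : List String) (out : Int) : Decidable (Spec_solution words out) := by unfold Spec_solution; infer_instance

-- ===== CLAIM (what is proved, stated in full; the proofs are below) =====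
def Claim_equal_solution : Prop := ∀ (words : List String), Dom_solution words → Spec_solution words (solution words)

-- ===== LEMMAS AND PROOFS =====

-- the run sequence of (prev, rest): chars that start a new run
def newRuns : Option Char → List Char → List Char
  | _, [] => []
  | prev, c :: rest => if prev = some c then newRuns (some c) rest else c :: newRuns (some c) rest

theorem isGroupA_iff : ∀ (rest : List Char) (prev : Option Char) (checker : List Char),
    (prev = none → checker = []) → (∀ p, prev = some p → p ∈ checker) →
    (isGroupA prev checker rest = true ↔
      (newRuns prev rest).Nodup ∧ ∀ c ∈ newRuns prev rest, c ∉ checker) := by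
  intro rest
  induction rest with
  | nil => intro prev checker _ _; simp [isGroupA, newRuns]
  | cons c rest ih =>
    intro prev checker h0 h1
    rw [isGroupA]
    by_cases hc : c ∈ checker
    · have hcc : checker.contains c = true := by simpa using hc
      rw [if_pos hcc]
      cases prev with
      | none => exact absurd hc (by simp [h0 rfl])
      | some p =>
        by_cases hpc : p = c
        · have hpn : prevNe (some p) c = false := by simp [prevNe, hpc]
          rw [hpn, if_neg (by simp)]
          rw [ih (some c) checker (by simp) (by intro q hq; cases hq; exact hc)]
          simp [newRuns, hpc]
        · have hpn : prevNe (some p) c = true := by simp [prevNe, hpc]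
          rw [hpn, if_pos rfl]
          have hnr : newRuns (some p) (c :: rest) = c :: newRuns (some c) rest := by
            rw [newRuns]; simp [hpc]
          rw [hnr]
          constructor
          · intro h; exact absurd h (by simp)
          · rintro ⟨-, hf⟩
            exact absurd hc (hf c (by simp))
    · have hcc : checker.contains c = false := by simpa using hc
      rw [if_neg (by simpa using hc)]
      have hprev : prev ≠ some c := fun h => hc (h1 c h)
      rw [ih (some c) (checker ++ [c]) (by simp) (by intro q hq; cases hq; simp)]
      have hnr : newRuns prev (c :: rest) = c :: newRuns (some c) rest := by
        cases prev with
        | none => rw [newRuns]; simp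
        | some p => rw [newRuns]; simp [hprev]
      rw [hnr]
      constructor
      · rintro ⟨hnd, hf⟩
        refine ⟨List.nodup_cons.mpr ⟨fun hmem => (hf c hmem) (by simp), hnd⟩, ?_⟩
        intro x hx
        rcases List.mem_cons.mp hx with hx | hx
        · subst hx; exact hc
        · intro hxch; exact hf x hx (by simp [hxch])
      · rintro ⟨hnd, hf⟩
        rcases List.nodup_cons.mp hnd with ⟨hcnot, hnd'⟩
        refine ⟨hnd', ?_⟩
        intro x hx hxmem
        rcases List.mem_append.mp hxmem with hxc | hxc
        · exact hf x (List.mem_cons_of_mem _ hx) hxc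
        · simp at hxc; subst hxc; exact hcnot hx

theorem collapseB_eq : ∀ (rest acc : List Char),
    collapseB acc rest = acc ++ newRuns acc.getLast? rest := by
  intro rest
  induction rest with
  | nil => intro acc; simp [collapseB, newRuns]
  | cons c rest ih =>
    intro acc
    by_cases h : acc.getLast? = some c
    · have hne : acc ≠ [] := by intro he; simp [he] at h
      rw [collapseB, if_neg (by simp [hne, h]), ih acc, h]
      simp [newRuns]
    · rw [collapseB, if_pos (Or.inr h), ih (acc ++ [c])]
      have hgl : (acc ++ [c]).getLast? = some c := by simp
      rw [hgl]
      conv_rhs => rw [newRuns, if_neg h]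
      simp

-- Set.ofList-length characterisation of Nodup
theorem length_foldl_add_le {α : Type} [BEq α] [LawfulBEq α] (l : List α) (s : List α) :
    (l.foldl PySem.Set.add s).length ≤ s.length + l.length := by
  induction l generalizing s with
  | nil => simp
  | cons a l ih =>
    simp only [List.foldl_cons, List.length_cons]
    calc (l.foldl PySem.Set.add (PySem.Set.add s a)).length
        ≤ (PySem.Set.add s a).length + l.length := ih _
      _ ≤ (s.length + 1) + l.length := by
          unfold PySem.Set.add; split <;> simp
      _ = s.length + (l.length + 1) := by omega

theorem length_foldl_add_eq_iff {α : Type} [BEq α] [LawfulBEq α] (l : List α) (s : List α) :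
    ((l.foldl PySem.Set.add s).length = s.length + l.length) ↔ (l.Nodup ∧ ∀ x ∈ l, x ∉ s) := by
  induction l generalizing s with
  | nil => simp
  | cons a l ih =>
    simp only [List.foldl_cons, List.length_cons, List.nodup_cons]
    by_cases ha : a ∈ s
    · have : PySem.Set.add s a = s := by unfold PySem.Set.add; simp [ha]
      rw [this]
      constructor
      · intro h
        have := length_foldl_add_le l s
        omega
      · rintro ⟨-, hf⟩; exact absurd ha (hf a (by simp))
    · have : PySem.Set.add s a = s ++ [a] := by unfold PySem.Set.add; simp [ha]
      rw [this]
      have hlen : (s ++ [a]).length = s.length + 1 := by simp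
      rw [show s.length + (l.length + 1) = (s ++ [a]).length + l.length by simp; omega]
      rw [ih (s ++ [a])]
      constructor
      · rintro ⟨hnd, hf⟩
        refine ⟨⟨fun hmem => (hf a hmem) (by simp), hnd⟩, ?_⟩
        intro x hx
        rcases List.mem_cons.mp hx with hx | hx
        · exact hx ▸ ha
        · intro hxs; exact hf x hx (by simp [hxs])
      · rintro ⟨⟨hal, hnd⟩, hf⟩
        refine ⟨hnd, ?_⟩
        intro x hx hxmem
        rcases List.mem_append.mp hxmem with hxs | hxs
        · exact hf x (by simp [hx]) hxs
        · simp at hxs; subst hxs; exact hal hx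

theorem ofList_length_eq_iff {α : Type} [BEq α] [LawfulBEq α] (l : List α) :
    ((PySem.Set.ofList l).length = l.length) ↔ l.Nodup := by
  have := length_foldl_add_eq_iff l ([] : List α)
  simp only [List.length_nil, Nat.zero_add, List.not_mem_nil, not_false_eq_true,
    implies_true, and_true] at this
  rw [PySem.Set.ofList_eq_foldl]
  exact this

theorem isGroup_eq (word : String) : isGroupA none [] word.toList = isGroupB word := by
  unfold isGroupB
  rw [collapseB_eq word.toList []]
  simp only [List.nil_append, List.getLast?_nil]
  rcases h : isGroupA none [] word.toList with hf | ht
  · symm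
    rw [Bool.eq_false_iff]
    intro hb
    have hnd : (newRuns none word.toList).Nodup := by
      have := (beq_iff_eq.mp hb).symm
      exact (ofList_length_eq_iff _).mp this
    have := (isGroupA_iff word.toList none [] (fun _ => rfl) (by simp)).mpr
      ⟨hnd, by simp⟩
    rw [h] at this; cases this
  · symm
    rw [beq_iff_eq]
    have := (isGroupA_iff word.toList none [] (fun _ => rfl) (by simp)).mp h
    exact ((ofList_length_eq_iff _).mpr this.1).symm

theorem fold_eq : ∀ (words : List String) (a : Int),
    words.foldl (fun answer word =>
      if isGroupA none [] word.toList = true then answer + 1 else answer) a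
    = words.foldl (fun acc word => acc + (if isGroupB word then 1 else 0)) a := by
  intro words
  induction words with
  | nil => intro a; rfl
  | cons w ws ih =>
    intro a
    simp only [List.foldl_cons]
    rw [isGroup_eq w]
    cases isGroupB w <;> simp [ih]

-- ===== VERDICT (by name: the statement is the Claim_ definition above) =====
theorem solution_spec : Claim_equal_solution := by
  intro words _
  unfold Spec_solution solution solution_alt
  exact fold_eq words 0
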